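-- pv_equiv track=rewrite | github.com/noahprowse/Matrix_ANPR_AND_MIDBLOCK_COUNTER | src/intersection/tmc_calculator.py | get_approach_summary
-- ===== SOURCE A (Python) =====
-- MOVEMENT_ORDER = ["Left", "Through", "Right", "U-Turn"]
--
-- def get_approach_summary(
--
--     approach: str,
--     tmc_data: dict,
-- ) -> dict[str, int]:
--     """Get totals for one approach zone across all intervals.
--
--     Args:
--         approach:  Zone name of the approach.
--         tmc_data:  TMC data structure from compute_tmc().
--
--     Returns:
--         Dict of movement_type -> total count.
--     """
--     totals: dict[str, int] = {m: 0 for m in MOVEMENT_ORDER}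
--
--     for interval_movements in tmc_data.values():
--         approach_data = interval_movements.get(approach, {})
--         for movement, classes in approach_data.items():
--             if movement in totals:
--                 totals[movement] += sum(classes.values())
--
--     return totals
-- ===== SOURCE B (Python) =====
-- MOVEMENT_ORDER = ["Left", "Through", "Right", "U-Turn"]
--
-- def get_approach_summary(approach, tmc_data):
--     intervals = list(tmc_data.values())
--
--     def total(chunk):
--         # divide-and-conquer reduction to a 4-vector of movement totals
--         if not chunk:
--             return [0, 0, 0, 0]
--         if len(chunk) == 1:
--             found = chunk[0].get(approach, {})
--             return [sum(found.get(m, {}).values()) for m in MOVEMENT_ORDER]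
--         mid = len(chunk) // 2
--         return [x + y for x, y in zip(total(chunk[:mid]), total(chunk[mid:]))]
--
--     return dict(zip(MOVEMENT_ORDER, total(intervals)))
-- ===== Notes on version B (the rewrite author's own statement) =====
-- stated objective: alternative
-- what changed: Replaces A's single iterative pass that mutates a totals dict entry by entry with a divide-and-conquer map-reduce: the interval list is split in half recursively, each half reduced to a 4-vector of movement totals, halves merged by pointwise vector addition, and the vector zipped with MOVEMENT_ORDER at the end; correctness follows from associativity of integer addition.
import Mathlib
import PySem

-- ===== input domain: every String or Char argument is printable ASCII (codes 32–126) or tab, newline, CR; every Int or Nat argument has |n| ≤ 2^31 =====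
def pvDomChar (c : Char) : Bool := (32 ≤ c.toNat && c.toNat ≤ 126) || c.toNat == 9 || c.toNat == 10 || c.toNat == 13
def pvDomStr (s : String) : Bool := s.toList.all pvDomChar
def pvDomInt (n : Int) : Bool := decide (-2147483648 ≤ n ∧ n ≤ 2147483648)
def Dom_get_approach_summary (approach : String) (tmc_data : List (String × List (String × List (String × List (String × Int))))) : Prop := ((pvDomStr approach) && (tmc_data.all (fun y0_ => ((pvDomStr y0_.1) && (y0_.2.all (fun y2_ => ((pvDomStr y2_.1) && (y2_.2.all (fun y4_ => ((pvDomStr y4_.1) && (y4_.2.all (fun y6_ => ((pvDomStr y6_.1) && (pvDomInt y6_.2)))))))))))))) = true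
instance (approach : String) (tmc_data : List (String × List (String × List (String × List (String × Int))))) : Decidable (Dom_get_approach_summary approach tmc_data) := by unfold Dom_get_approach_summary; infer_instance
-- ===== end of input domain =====

-- B replaces A's single accumulating pass over a mutable totals dict with a divide-and-conquer
-- reduction: split the interval list in half, compute each half's 4-vector of movement totals,
-- merge by vector addition, zip with MOVEMENT_ORDER at the end (objective: alternative).

-- ===== PORT A =====
def pvMOVEMENT_ORDER : List String := ["Left", "Through", "Right", "U-Turn"]

def get_approach_summary (approach : String) (tmc_data : List (String × List (String × List (String × List (String × Int))))) : List (String × Int) :=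
  -- totals = {m: 0 for m in MOVEMENT_ORDER}
  let totals0 : PySem.Dict String Int := pvMOVEMENT_ORDER.foldl (fun d m => d.insert m 0) PySem.Dict.empty
  -- for interval_movements in tmc_data.values(): …
  (tmc_data.foldl (fun totals iv =>
      let approach_data := (PySem.Dict.mk iv.2).getD approach []
      -- for movement, classes in approach_data.items(): if movement in totals: totals[movement] += sum(classes.values())
      approach_data.foldl (fun t p =>
        if t.contains p.1 then t.modify p.1 0 (fun v => v + ((PySem.Dict.mk p.2).values).sum) else t) totals)
    totals0).items

-- ===== PORT B =====
-- leaf of the recursion: one interval's 4-vector of movement totals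
def pvLeaf (approach : String) (iv : List (String × List (String × List (String × Int)))) : List Int :=
  let found := (PySem.Dict.mk iv).getD approach []
  pvMOVEMENT_ORDER.map (fun m => ((PySem.Dict.mk ((PySem.Dict.mk found).getD m [])).values).sum)

-- total(chunk): divide-and-conquer; chunk[:mid] / chunk[mid:] are exactly take/drop since 0 ≤ mid ≤ len
def pvTotal (approach : String) (chunk : List (List (String × List (String × List (String × Int))))) : List Int :=
  if chunk.isEmpty then [0, 0, 0, 0]
  else if chunk.length = 1 then pvLeaf approach (chunk.headD [])
  else
    let mid := chunk.length / 2
    List.zipWith (· + ·) (pvTotal approach (chunk.take mid)) (pvTotal approach (chunk.drop mid))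
termination_by chunk.length
decreasing_by
  · rename_i h0 h1
    have hne0 : chunk.length ≠ 0 := by
      intro hh; exact h0 (by simp [List.length_eq_zero_iff.mp hh])
    simp only [List.length_take]
    omega
  · rename_i h0 h1
    have hne0 : chunk.length ≠ 0 := by
      intro hh; exact h0 (by simp [List.length_eq_zero_iff.mp hh])
    simp only [List.length_drop]
    omega

def get_approach_summary_alt (approach : String) (tmc_data : List (String × List (String × List (String × List (String × Int))))) : List (String × Int) :=
  pvMOVEMENT_ORDER.zip (pvTotal approach (tmc_data.map Prod.snd))

-- ===== PRECONDITION & SPEC =====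
-- Pre_ excludes association lists carrying duplicate keys at any of the nested dict levels:
-- such lists do not represent any Python dict, so A's behaviour on them is not defined.
def Pre_get_approach_summary (approach : String) (tmc_data : List (String × List (String × List (String × List (String × Int))))) : Prop :=
  (tmc_data.map Prod.fst).Nodup ∧
  ∀ iv ∈ tmc_data, (iv.2.map Prod.fst).Nodup ∧
    ∀ ad ∈ iv.2, (ad.2.map Prod.fst).Nodup ∧
      ∀ cl ∈ ad.2, (cl.2.map Prod.fst).Nodup
instance (approach : String) (tmc_data : List (String × List (String × List (String × List (String × Int))))) : Decidable (Pre_get_approach_summary approach tmc_data) := by unfold Pre_get_approach_summary; infer_instance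

def pvWitness_get_approach_summary : String × (List (String × List (String × List (String × List (String × Int))))) :=
  ("N", [("i1", [("N", [("Left", [("car", 2), ("bus", 1)])]), ("S", [("Right", [("car", 4)])])])])

def Spec_get_approach_summary (approach : String) (tmc_data : List (String × List (String × List (String × List (String × Int))))) (out : List (String × Int)) : Prop := out = get_approach_summary_alt approach tmc_data
instance (approach : String) (tmc_data : List (String × List (String × List (String × List (String × Int))))) (out : List (String × Int)) : Decidable (Spec_get_approach_summary approach tmc_data out) := by unfold Spec_get_approach_summary; infer_instance

-- ===== CLAIM (what is proved, stated in full; the proofs are below) =====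
def Claim_equal_get_approach_summary : Prop := ∀ (approach : String) (tmc_data : List (String × List (String × List (String × List (String × Int))))), Dom_get_approach_summary approach tmc_data → Pre_get_approach_summary approach tmc_data → Spec_get_approach_summary approach tmc_data (get_approach_summary approach tmc_data)

-- ===== LEMMAS AND PROOFS =====

-- per-interval contribution of movement m inside approach_data ad
def pvG (m : String) (ad : List (String × List (String × Int))) : Int :=
  ((PySem.Dict.mk ((PySem.Dict.mk ad).getD m [])).values).sum

-- B-side sum of pvG over a chunk of intervals
def pvS (approach m : String) (xs : List (List (String × List (String × List (String × Int))))) : Int :=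
  (xs.map (fun iv => pvG m ((PySem.Dict.mk iv).getD approach []))).sum

lemma pvG_cons (x m : String) (cls : List (String × Int)) (rest : List (String × List (String × Int))) :
    pvG x ((m, cls) :: rest) = if m == x then ((PySem.Dict.mk cls).values).sum else pvG x rest := by
  simp only [pvG, PySem.Dict.getD_eq_get?_getD, PySem.Dict.get?_mk_cons]
  split <;> rfl

lemma pvG_of_not_mem (x : String) (ad : List (String × List (String × Int)))
    (h : x ∉ ad.map Prod.fst) : pvG x ad = 0 := by
  have hn : (PySem.Dict.mk ad).get? x = none := by
    rw [PySem.Dict.get?_eq_none_iff_not_mem_keys]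
    simpa [PySem.Dict.keys] using h
  simp [pvG, PySem.Dict.getD_eq_get?_getD, hn]

lemma pvStep (m : String) (s a b c d : Int) :
    (if (PySem.Dict.mk [("Left", a), ("Through", b), ("Right", c), ("U-Turn", d)]).contains m
      then (PySem.Dict.mk [("Left", a), ("Through", b), ("Right", c), ("U-Turn", d)]).modify m 0 (fun v => v + s)
      else (PySem.Dict.mk [("Left", a), ("Through", b), ("Right", c), ("U-Turn", d)]))
    = PySem.Dict.mk [("Left", if m == "Left" then a + s else a),
        ("Through", if m == "Through" then b + s else b),
        ("Right", if m == "Right" then c + s else c),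
        ("U-Turn", if m == "U-Turn" then d + s else d)] := by
  by_cases h1 : m = "Left"
  · subst h1; simp [PySem.Dict.contains, PySem.Dict.modify, PySem.Dict.getD, PySem.Dict.get?, PySem.Dict.insert]
  · by_cases h2 : m = "Through"
    · subst h2; simp [PySem.Dict.contains, PySem.Dict.modify, PySem.Dict.getD, PySem.Dict.get?, PySem.Dict.insert]
    · by_cases h3 : m = "Right"
      · subst h3; simp [PySem.Dict.contains, PySem.Dict.modify, PySem.Dict.getD, PySem.Dict.get?, PySem.Dict.insert]
      · by_cases h4 : m = "U-Turn"
        · subst h4; simp [PySem.Dict.contains, PySem.Dict.modify, PySem.Dict.getD, PySem.Dict.get?, PySem.Dict.insert]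
        · simp [PySem.Dict.contains, h1, h2, h3, h4, Ne.symm h1, Ne.symm h2, Ne.symm h3, Ne.symm h4]

lemma pvInner (ad : List (String × List (String × Int)))
    (h : (ad.map Prod.fst).Nodup) (a b c d : Int) :
    ad.foldl (fun t p =>
        if t.contains p.1 then t.modify p.1 0 (fun v => v + ((PySem.Dict.mk p.2).values).sum) else t)
      (PySem.Dict.mk [("Left", a), ("Through", b), ("Right", c), ("U-Turn", d)])
    = PySem.Dict.mk [("Left", a + pvG "Left" ad), ("Through", b + pvG "Through" ad),
        ("Right", c + pvG "Right" ad), ("U-Turn", d + pvG "U-Turn" ad)] := by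
  induction ad generalizing a b c d with
  | nil => simp [pvG, PySem.Dict.getD, PySem.Dict.get?]
  | cons p rest ih =>
    obtain ⟨m, cls⟩ := p
    simp only [List.map_cons, List.nodup_cons] at h
    obtain ⟨hm, hrest⟩ := h
    simp only [List.foldl_cons]
    rw [pvStep, ih hrest]
    simp only [pvG_cons, PySem.Dict.mk.injEq, List.cons.injEq, Prod.mk.injEq, beq_iff_eq, and_true, true_and]
    refine ⟨?_, ?_, ?_, ?_⟩ <;>
      (split_ifs with hh
       · rw [pvG_of_not_mem _ _ (hh ▸ hm)]; ring
       · ring)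

lemma pvAD_nodup (approach : String) (iv : List (String × List (String × List (String × Int))))
    (h : ∀ ad ∈ iv, (ad.2.map Prod.fst).Nodup) :
    ((((PySem.Dict.mk iv).getD approach []) : List (String × List (String × Int))).map Prod.fst).Nodup := by
  rw [PySem.Dict.getD_eq_get?_getD]
  rcases hq : (PySem.Dict.mk iv).get? approach with _ | ad
  · simp
  · have hmem : (approach, ad) ∈ (PySem.Dict.mk iv).items := PySem.Dict.mem_items_of_get?_eq_some _ hq
    simpa using h (approach, ad) hmem

lemma pvOuter (approach : String) (tmc_data : List (String × List (String × List (String × List (String × Int)))))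
    (h : ∀ iv ∈ tmc_data, ∀ ad ∈ iv.2, (ad.2.map Prod.fst).Nodup) (a b c d : Int) :
    tmc_data.foldl (fun totals iv =>
        ((PySem.Dict.mk iv.2).getD approach []).foldl (fun t p =>
          if t.contains p.1 then t.modify p.1 0 (fun v => v + ((PySem.Dict.mk p.2).values).sum) else t) totals)
      (PySem.Dict.mk [("Left", a), ("Through", b), ("Right", c), ("U-Turn", d)])
    = PySem.Dict.mk [
        ("Left", a + (tmc_data.map (fun iv => pvG "Left" ((PySem.Dict.mk iv.2).getD approach []))).sum),
        ("Through", b + (tmc_data.map (fun iv => pvG "Through" ((PySem.Dict.mk iv.2).getD approach []))).sum),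
        ("Right", c + (tmc_data.map (fun iv => pvG "Right" ((PySem.Dict.mk iv.2).getD approach []))).sum),
        ("U-Turn", d + (tmc_data.map (fun iv => pvG "U-Turn" ((PySem.Dict.mk iv.2).getD approach []))).sum)] := by
  induction tmc_data generalizing a b c d with
  | nil => simp
  | cons iv rest ih =>
    simp only [List.foldl_cons]
    rw [pvInner _ (pvAD_nodup approach iv.2 (h iv (List.mem_cons_self))),
      ih (fun x hx => h x (List.mem_cons_of_mem _ hx))]
    simp only [PySem.Dict.mk.injEq, List.cons.injEq, Prod.mk.injEq, List.map_cons, List.sum_cons,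
      and_true, true_and]
    refine ⟨?_, ?_, ?_, ?_⟩ <;> ring

lemma pvS_append (approach m : String) (xs ys : List (List (String × List (String × List (String × Int))))) :
    pvS approach m (xs ++ ys) = pvS approach m xs + pvS approach m ys := by
  simp [pvS]

-- characterization of B's divide-and-conquer reduction
lemma pvTotal_eq (approach : String) :
    ∀ (n : ℕ) (xs : List (List (String × List (String × List (String × Int))))), xs.length ≤ n →
    pvTotal approach xs =
      [pvS approach "Left" xs, pvS approach "Through" xs, pvS approach "Right" xs, pvS approach "U-Turn" xs] := by
  intro n
  induction n with
  | zero =>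
    intro xs hx
    have : xs = [] := List.length_eq_zero_iff.mp (Nat.le_zero.mp hx)
    subst this
    simp [pvTotal, pvS]
  | succ k ih =>
    intro xs hx
    rcases xs with _ | ⟨iv, rest⟩
    · simp [pvTotal, pvS]
    rcases rest with _ | ⟨iv2, rest2⟩
    · rw [pvTotal]
      simp [pvLeaf, pvS, pvG, pvMOVEMENT_ORDER]
    · rw [pvTotal]
      have hne : ((iv :: iv2 :: rest2 : List _).isEmpty) = false := by simp
      have hlen : (iv :: iv2 :: rest2 : List _).length ≠ 1 := by simp
      rw [if_neg (by simp), if_neg hlen]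
      dsimp only
      set xs := (iv :: iv2 :: rest2 : List (List (String × List (String × List (String × Int))))) with hxs
      set mid := xs.length / 2 with hmid
      have h2 : 2 ≤ xs.length := by simp [hxs]
      have hm1 : 1 ≤ mid := by omega
      have htake : (xs.take mid).length ≤ k := by
        simp only [List.length_take]; omega
      have hdrop : (xs.drop mid).length ≤ k := by
        simp only [List.length_drop]; omega
      rw [ih _ htake, ih _ hdrop]
      have hsplit : ∀ m, pvS approach m xs = pvS approach m (xs.take mid) + pvS approach m (xs.drop mid) := by
        intro m
        conv_lhs => rw [← List.take_append_drop mid xs]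
        exact pvS_append approach m _ _
      simp only [List.zipWith]
      rw [hsplit "Left", hsplit "Through", hsplit "Right", hsplit "U-Turn"]

-- ===== VERDICT (by name: the statement is the Claim_ definition above) =====
theorem get_approach_summary_spec : Claim_equal_get_approach_summary := by
  intro approach tmc_data _hdom hpre
  unfold Spec_get_approach_summary
  obtain ⟨-, hpre⟩ := hpre
  have hmov : ∀ iv ∈ tmc_data, ∀ ad ∈ iv.2, (ad.2.map Prod.fst).Nodup :=
    fun iv hiv ad had => ((hpre iv hiv).2 ad had).1
  have e0 : (pvMOVEMENT_ORDER.foldl (fun d m => d.insert m 0) PySem.Dict.empty : PySem.Dict String Int)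
      = PySem.Dict.mk [("Left", 0), ("Through", 0), ("Right", 0), ("U-Turn", 0)] := by rfl
  simp only [get_approach_summary, get_approach_summary_alt]
  rw [e0, pvOuter approach tmc_data hmov,
    pvTotal_eq approach (tmc_data.map Prod.snd).length _ le_rfl]
  simp [pvMOVEMENT_ORDER, pvS, pvG, Function.comp_def]
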